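-- pv_equiv track=rewrite | github.com/nikolaoskoutantos/Building-Efficiency-Tool | api/services/hvac_optimizer_service.py | _generate_operation
-- ===== SOURCE A (Python) =====
-- from typing import List, Tuple, Dict, Optional, Any
--
-- def _generate_operation(duration: int, switches, starting_operation: int) -> List[int]:
--     """Generate the 12-step service schedule used by the app/API."""
--     current = starting_operation
--     operation: List[int] = []
--     for i in range(duration):
--         if i in switches:
--             current ^= 1
--         operation.append(current)
--     return operation
-- ===== SOURCE B (Python) =====
-- def _generate_operation(duration, switches, starting_operation):
--     """Fill the schedule in constant-value runs between sorted switch points."""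
--     points = sorted({p for p in switches if 0 <= p < duration})
--     operation = []
--     current = starting_operation
--     prev = 0
--     for p in points:
--         operation.extend([current] * (p - prev))
--         current ^= 1
--         prev = p
--     operation.extend([current] * (duration - prev))
--     return operation
-- ===== Notes on version B (the rewrite author's own statement) =====
-- stated objective: faster
-- what changed: Instead of testing 'i in switches' at every index, B sorts the deduplicated in-range switch points once and emits the schedule as constant-value runs between consecutive switch points.
import Mathlib
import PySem

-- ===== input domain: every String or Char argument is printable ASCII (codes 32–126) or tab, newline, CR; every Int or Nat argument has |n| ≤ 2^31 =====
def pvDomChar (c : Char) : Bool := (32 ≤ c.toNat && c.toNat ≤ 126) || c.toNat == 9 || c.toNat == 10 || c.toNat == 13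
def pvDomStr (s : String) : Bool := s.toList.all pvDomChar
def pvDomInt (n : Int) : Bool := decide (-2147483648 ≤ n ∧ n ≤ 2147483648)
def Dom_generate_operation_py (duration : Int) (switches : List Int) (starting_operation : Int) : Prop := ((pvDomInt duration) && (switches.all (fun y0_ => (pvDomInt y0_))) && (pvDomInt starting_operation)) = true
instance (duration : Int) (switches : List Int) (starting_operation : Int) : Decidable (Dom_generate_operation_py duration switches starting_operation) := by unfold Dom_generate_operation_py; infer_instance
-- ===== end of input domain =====

-- B replaces the per-index membership test with one sort of the deduplicated
-- in-range switch points and fills the schedule as constant-value runs (faster).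

-- ===== PORT A =====
def generate_operation_py (duration : Int) (switches : List Int) (starting_operation : Int) : List Int :=
  let r := (PySem.List.pyRange 0 duration 1).foldl
    (fun (st : Int × List Int) i =>
      let current := if switches.contains i then PySem.Int.bxor st.1 1 else st.1
      (current, st.2 ++ [current]))
    (starting_operation, [])
  r.2

-- ===== PORT B =====
def generate_operation_py_alt (duration : Int) (switches : List Int) (starting_operation : Int) : List Int :=
  let points := PySem.List.sorted
    (PySem.Set.ofList (switches.filter (fun p => decide (0 ≤ p) && decide (p < duration))))
    (fun x => x) false
  let st := points.foldl
    (fun (st : List Int × Int × Int) p =>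
      (st.1 ++ List.replicate (p - st.2.2).toNat st.2.1, PySem.Int.bxor st.2.1 1, p))
    ([], starting_operation, 0)
  st.1 ++ List.replicate (duration - st.2.2).toNat st.2.1

-- ===== PRECONDITION & SPEC =====
def Spec_generate_operation_py (duration : Int) (switches : List Int) (starting_operation : Int) (out : List Int) : Prop := out = generate_operation_py_alt duration switches starting_operation
instance (duration : Int) (switches : List Int) (starting_operation : Int) (out : List Int) : Decidable (Spec_generate_operation_py duration switches starting_operation out) := by unfold Spec_generate_operation_py; infer_instance

-- ===== CLAIM (what is proved, stated in full; the proofs are below) =====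
def Claim_equal_generate_operation_py : Prop := ∀ (duration : Int) (switches : List Int) (starting_operation : Int), Dom_generate_operation_py duration switches starting_operation → Spec_generate_operation_py duration switches starting_operation (generate_operation_py duration switches starting_operation)

-- ===== LEMMAS AND PROOFS =====

-- `tog s k` = s xor'd with 1 exactly k times
def pvTog (s : Int) (k : Nat) : Int := if k % 2 = 1 then PySem.Int.bxor s 1 else s

-- number of indices j < m with j ∈ switches
def pvCnt (sw : List Int) (m : Nat) : Nat := (List.range m).countP (fun j => sw.contains ((j : Nat) : Int))

theorem pv_bxor_cancel (a : Int) : PySem.Int.bxor (PySem.Int.bxor a 1) 1 = a := by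
  unfold PySem.Int.bxor
  split_ifs <;> (simp_all; try omega)

theorem pvTog_succ (s : Int) (k : Nat) : pvTog s (k + 1) = PySem.Int.bxor (pvTog s k) 1 := by
  unfold pvTog
  rcases Nat.even_or_odd k with h | h
  · have : k % 2 = 0 := Nat.even_iff.mp h
    simp [this, Nat.add_mod]
  · have hk : k % 2 = 1 := Nat.odd_iff.mp h
    simp [hk, Nat.add_mod, pv_bxor_cancel]

theorem pvTog_one_add (s : Int) (k : Nat) : pvTog s (1 + k) = pvTog (PySem.Int.bxor s 1) k := by
  induction k with
  | zero => simp [pvTog]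
  | succ n ih => rw [show 1 + (n+1) = (1+n) + 1 by omega, pvTog_succ, ih, pvTog_succ]

theorem pvCnt_succ (sw : List Int) (n : Nat) :
    pvCnt sw (n + 1) = pvCnt sw n + (if sw.contains ((n : Nat) : Int) then 1 else 0) := by
  unfold pvCnt
  rw [List.range_succ, List.countP_append]
  simp [List.countP_cons]

-- characterisation of A's fold
theorem pvA_char (sw : List Int) (s : Int) (n : Nat) :
    ((List.range n).map (fun k => ((k : Nat) : Int))).foldl
      (fun (st : Int × List Int) i =>
        let current := if sw.contains i then PySem.Int.bxor st.1 1 else st.1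
        (current, st.2 ++ [current]))
      (s, ([] : List Int))
    = (pvTog s (pvCnt sw n), (List.range n).map (fun i => pvTog s (pvCnt sw (i + 1)))) := by
  induction n with
  | zero => simp [pvCnt, pvTog]
  | succ n ih =>
    rw [List.range_succ, List.map_append, List.foldl_append, ih]
    simp only [List.map_cons, List.map_nil, List.foldl_cons, List.foldl_nil, List.map_append]
    rw [pvCnt_succ]
    by_cases h : ((n : Nat) : Int) ∈ sw <;>
      simp [h, pvTog_succ]

-- characterisation of B's fold: runs between strictly increasing in-[prev,d) points
theorem pvB_char (d : Int) (pts : List Int) (cur prev : Int) (acc : List Int)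
    (hs : pts.Pairwise (· < ·)) (hlb : ∀ p ∈ pts, prev ≤ p) (hub : ∀ p ∈ pts, p < d) :
    (let st := pts.foldl
      (fun (st : List Int × Int × Int) p =>
        (st.1 ++ List.replicate (p - st.2.2).toNat st.2.1, PySem.Int.bxor st.2.1 1, p))
      (acc, cur, prev)
     st.1 ++ List.replicate (d - st.2.2).toNat st.2.1)
    = acc ++ (List.range (d - prev).toNat).map
        (fun k => pvTog cur (pts.countP (fun p => p ≤ prev + (k : Nat)))) := by
  induction pts generalizing cur prev acc with
  | nil =>
    simp only [List.foldl_nil, List.countP_nil]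
    rw [show (fun (k : Nat) => pvTog cur 0) = (fun (_ : Nat) => cur) from funext (fun _ => by simp [pvTog])]
    simp [List.map_const']
  | cons p ps ih =>
    have hpp : prev ≤ p := hlb p (by simp)
    have hpd : p < d := hub p (by simp)
    have hps : ∀ q ∈ ps, p ≤ q := fun q hq => le_of_lt ((List.pairwise_cons.mp hs).1 q hq)
    simp only [List.foldl_cons]
    rw [ih (PySem.Int.bxor cur 1) p _ (List.pairwise_cons.mp hs).2 hps (fun q hq => hub q (by simp [hq]))]
    rw [List.append_assoc]
    congr 1
    have hsplit : (d - prev).toNat = (p - prev).toNat + (d - p).toNat := by omega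
    rw [hsplit, List.range_add, List.map_append, List.map_map]
    congr 1
    · -- first run: indices below p see count 0
      have hconst : ∀ k ∈ List.range (p - prev).toNat,
          pvTog cur ((p :: ps).countP (fun q => q ≤ prev + (k : Nat))) = cur := by
        intro k hk
        have hk' : (k : Int) < p - prev := by
          have := List.mem_range.mp hk; omega
        have h0 : (p :: ps).countP (fun q => q ≤ prev + (k : Nat)) = 0 := by
          rw [List.countP_eq_zero]
          intro q hq
          have hpq : p ≤ q := by
            rcases List.mem_cons.mp hq with h | h
            · omega
            · exact hps q h
          simp only [decide_eq_true_eq]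
          omega
        rw [h0]; simp [pvTog]
      rw [List.map_congr_left hconst]
      simp [List.map_const']
    · -- tail run: shift the index and peel the head point
      apply List.map_congr_left
      intro k hk
      simp only [Function.comp]
      have heq : prev + ((p - prev).toNat + k : Nat) = p + (k : Nat) := by
        push_cast; omega
      rw [heq]
      have hcnt : (p :: ps).countP (fun q => q ≤ p + (k : Nat)) =
          1 + ps.countP (fun q => q ≤ p + (k : Nat)) := by
        have hle : p ≤ p + ((k : Nat) : Int) := by omega
        simp [hle]
        omega
      rw [hcnt, pvTog_one_add]

-- the two counts agree: distinct in-range points ≤ k  vs  indices j ≤ k with j ∈ sw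
theorem pv_counts_eq (d : Int) (sw : List Int) (pts : List Int)
    (hnd : pts.Nodup)
    (hmem : ∀ x, x ∈ pts ↔ (0 ≤ x ∧ x < d ∧ sw.contains x)) (k : Nat) (hk : (k : Int) < d) :
    pts.countP (fun p => p ≤ ((k : Nat) : Int)) = pvCnt sw (k + 1) := by
  rw [List.countP_eq_length_filter]
  unfold pvCnt
  rw [List.countP_eq_length_filter]
  have h2 : (((List.range (k+1)).filter (fun j => sw.contains ((j : Nat) : Int))).map
      (fun (j : Nat) => (j : Int))).length
      = ((List.range (k+1)).filter (fun j => sw.contains ((j : Nat) : Int))).length := by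
    simp
  rw [← h2]
  have hperm : (pts.filter (fun p => decide (p ≤ ((k : Nat) : Int)))).Perm
      (((List.range (k+1)).filter (fun j => sw.contains ((j : Nat) : Int))).map
        (fun (j : Nat) => (j : Int))) := by
    rw [List.perm_ext_iff_of_nodup (hnd.filter _)
      ((List.Nodup.filter _ (List.nodup_range)).map (fun a b => by omega))]
    intro x
    simp only [List.mem_filter, List.mem_map, List.mem_range, decide_eq_true_eq, hmem]
    constructor
    · rintro ⟨⟨hx0, hxd, hxs⟩, hxk⟩
      exact ⟨x.toNat, ⟨by omega, by simpa [Int.toNat_of_nonneg hx0] using hxs⟩, by omega⟩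
    · rintro ⟨j, ⟨hj, hjs⟩, rfl⟩
      exact ⟨⟨by omega, by omega, hjs⟩, by omega⟩
  exact hperm.length_eq

-- ===== VERDICT (by name: the statement is the Claim_ definition above) =====
theorem generate_operation_py_spec : Claim_equal_generate_operation_py := by
  intro d sw s _
  unfold Spec_generate_operation_py generate_operation_py generate_operation_py_alt
  set pts := PySem.List.sorted
    (PySem.Set.ofList (sw.filter (fun p => decide (0 ≤ p) && decide (p < d))))
    (fun x => x) false with hpts
  have hmem : ∀ x, x ∈ pts ↔ (0 ≤ x ∧ x < d ∧ sw.contains x) := by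
    intro x
    rw [hpts, PySem.List.mem_sorted, PySem.Set.mem_ofList, List.mem_filter]
    simp only [Bool.and_eq_true, decide_eq_true_eq, List.contains_iff_mem]
    constructor
    · rintro ⟨hx, h0, hd⟩; exact ⟨h0, hd, hx⟩
    · rintro ⟨h0, hd, hx⟩; exact ⟨hx, h0, hd⟩
  have hsorted : pts.Pairwise (· < ·) := PySem.List.sorted_ofList_pairwise_lt _
  have hnd : pts.Nodup := hsorted.imp (fun h => ne_of_lt h)
  have hB := pvB_char d pts s 0 []
    hsorted (fun p hp => ((hmem p).mp hp).1) (fun p hp => ((hmem p).mp hp).2.1)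
  simp only [List.nil_append] at hB
  rw [hB]
  have hA : PySem.List.pyRange 0 d 1 = (List.range d.toNat).map (fun k => ((k : Nat) : Int)) := by
    rw [PySem.List.pyRange_one]
    simp
  rw [hA, pvA_char]
  simp only [sub_zero]
  apply List.map_congr_left
  intro k hk
  have hk' : (k : Int) < d := by
    have := List.mem_range.mp hk; omega
  rw [show ((0 : Int) + (k : Nat)) = ((k : Nat) : Int) by omega]
  rw [pv_counts_eq d sw pts hnd hmem k hk']
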